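-- pv_equiv track=rewrite | github.com/Emillhf/Construction_of_a_Self-Interpreter | Compilers/3_tape_to_1_tape.py | inner_list
-- ===== SOURCE A (Python) =====
-- def inner_list(rules,tape):
--     tape_dict = {}
--     for rule in rules:
--         tape_elm = rule[tape]
--         if tape_elm in tape_dict.keys():
--             tape_dict[tape_elm].append(rule)
--         else:
--             tape_dict[tape_elm] = [rule]
--     return list(tape_dict.values())
-- ===== SOURCE B (Python) =====
-- def inner_list(rules, tape):
--     keys = list(dict.fromkeys(rule[tape] for rule in rules))
--     return [[rule for rule in rules if rule[tape] == k] for k in keys]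
-- ===== Notes on version B (the rewrite author's own statement) =====
-- stated objective: idiomatic
-- what changed: Replaces the single-pass dict-bucketing accumulator with a two-phase formulation: first compute the distinct tape values in first-appearance order via dict.fromkeys, then build each group by an independent filtering scan of rules per key.
import Mathlib
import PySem

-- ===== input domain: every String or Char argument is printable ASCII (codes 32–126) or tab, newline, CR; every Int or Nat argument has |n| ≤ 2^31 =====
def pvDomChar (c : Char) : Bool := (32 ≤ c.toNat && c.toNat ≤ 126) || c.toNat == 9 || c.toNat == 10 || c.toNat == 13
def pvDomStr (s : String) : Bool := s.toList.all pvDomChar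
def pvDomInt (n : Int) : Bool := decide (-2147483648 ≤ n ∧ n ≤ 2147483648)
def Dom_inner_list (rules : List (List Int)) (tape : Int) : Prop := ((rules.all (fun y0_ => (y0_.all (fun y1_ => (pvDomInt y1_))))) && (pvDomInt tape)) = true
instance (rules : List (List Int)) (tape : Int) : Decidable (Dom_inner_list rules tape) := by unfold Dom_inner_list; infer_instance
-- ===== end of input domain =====

-- B groups the rules by two independent scans (distinct keys first, then one filter per key)
-- instead of A's single-pass dict accumulation; objective: idiomatic, not faster.

-- ===== PORT A =====
-- A: one pass, bucketing each rule into tape_dict[rule[tape]] (append if present, fresh list otherwise)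
def inner_list (rules : List (List Int)) (tape : Int) : List (List (List Int)) :=
  (rules.foldl
    (fun (d : PySem.Dict Int (List (List Int))) rule =>
      let tape_elm := PySem.List.pyGetD rule tape 0
      if d.contains tape_elm then
        d.insert tape_elm (d.getD tape_elm [] ++ [rule])
      else
        d.insert tape_elm [rule])
    PySem.Dict.empty).values

-- ===== PORT B =====
-- B: keys = list(dict.fromkeys(rule[tape] for rule in rules)); one filter scan per key
def inner_list_alt (rules : List (List Int)) (tape : Int) : List (List (List Int)) :=
  let keys := PySem.List.dedup (rules.map (fun rule => PySem.List.pyGetD rule tape 0))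
  keys.map (fun k => rules.filter (fun rule => PySem.List.pyGetD rule tape 0 == k))

-- ===== PRECONDITION & SPEC =====
-- Pre_: rule[tape] must be in range for every rule, else Python raises IndexError (in A and B alike).
def Pre_inner_list (rules : List (List Int)) (tape : Int) : Prop :=
  ∀ rule ∈ rules, PySem.Raise.InRange rule.length tape
instance (rules : List (List Int)) (tape : Int) : Decidable (Pre_inner_list rules tape) := by
  unfold Pre_inner_list; infer_instance

def pvWitness_inner_list : List (List Int) × Int := ([[1, 2], [3, 2], [4, 5]], 1)

def Spec_inner_list (rules : List (List Int)) (tape : Int) (out : List (List (List Int))) : Prop := out = inner_list_alt rules tape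
instance (rules : List (List Int)) (tape : Int) (out : List (List (List Int))) : Decidable (Spec_inner_list rules tape out) := by unfold Spec_inner_list; infer_instance

-- ===== CLAIM (what is proved, stated in full; the proofs are below) =====
def Claim_equal_inner_list : Prop := ∀ (rules : List (List Int)) (tape : Int), Dom_inner_list rules tape → Pre_inner_list rules tape → Spec_inner_list rules tape (inner_list rules tape)

-- ===== LEMMAS AND PROOFS =====

-- A's loop body is exactly Dict.modify with default []
theorem inner_list_step_eq_modify (d : PySem.Dict Int (List (List Int))) (k : Int)
    (rule : List Int) :
    (if d.contains k then d.insert k (d.getD k [] ++ [rule]) else d.insert k [rule])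
      = d.modify k [] (· ++ [rule]) := by
  by_cases h : d.contains k = true
  · simp [h, PySem.Dict.modify, PySem.Dict.getD_eq_get?_getD]
  · simp [eq_false_of_ne_true h, PySem.Dict.modify, PySem.Dict.getD_eq_get?_getD,
      (PySem.Dict.get?_eq_none_iff_contains _ _).mpr (eq_false_of_ne_true h)]

theorem inner_list_eq (rules : List (List Int)) (tape : Int) :
    inner_list rules tape = inner_list_alt rules tape := by
  unfold inner_list inner_list_alt
  have hstep :
      rules.foldl
        (fun (d : PySem.Dict Int (List (List Int))) rule =>
          let tape_elm := PySem.List.pyGetD rule tape 0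
          if d.contains tape_elm then
            d.insert tape_elm (d.getD tape_elm [] ++ [rule])
          else d.insert tape_elm [rule])
        PySem.Dict.empty
      = (rules.map (fun rule => (PySem.List.pyGetD rule tape 0, rule))).foldl
          (fun (d : PySem.Dict Int (List (List Int))) p => d.modify p.1 [] (· ++ [p.2]))
          PySem.Dict.empty := by
    rw [List.foldl_map]
    exact PySem.List.foldl_congr_mem _ _ _ _ (fun d rule _ => inner_list_step_eq_modify d _ rule)
  rw [hstep]
  set l := rules.map (fun rule => (PySem.List.pyGetD rule tape 0, rule)) with hl
  set df := l.foldl (fun (d : PySem.Dict Int (List (List Int))) p => d.modify p.1 [] (· ++ [p.2]))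
      PySem.Dict.empty with hdf
  have hnd : df.keys.Nodup := by
    rw [hdf]
    exact PySem.Dict.nodup_keys_foldl_modify_key l Prod.fst [] (fun d p => (· ++ [p.2])) _
      PySem.Dict.nodup_keys_empty
  have hkeys : df.keys = PySem.Set.ofList (rules.map fun rule => PySem.List.pyGetD rule tape 0) := by
    rw [hdf]
    rw [PySem.Dict.keys_foldl_modify_key]
    rw [show (PySem.Dict.empty : PySem.Dict Int (List (List Int))).keys = [] from rfl,
      PySem.Set.update_nil_left, hl, List.map_map]
    simp [Function.comp_def]
  rw [PySem.Dict.values_eq_map_keys df hnd ([] : List (List Int)), hkeys,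
    PySem.List.dedup_eq_ofList]
  apply List.map_congr_left
  intro k _
  rw [hdf, PySem.Dict.getD_foldl_modify_append, PySem.Dict.getD_empty, hl]
  simp [List.filter_map, Function.comp_def]

-- ===== VERDICT (by name: the statement is the Claim_ definition above) =====
theorem inner_list_spec : Claim_equal_inner_list := by
  intro rules tape _ _
  unfold Spec_inner_list
  exact inner_list_eq rules tape
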